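-- pv_equiv track=rewrite | github.com/rsally1/funcode | repeated.py | repeated_unique
-- ===== SOURCE A (Python) =====
-- def repeated_unique(arr):
--     scanned = []
--     sum_scanned = 0
--     sum_dups = 0
--
--     for n in arr:
--         if n not in scanned:
--             sum_scanned = sum_scanned + n
--             scanned.append(n)
--         else:
--             sum_dups = sum_dups + n
--     return sum_scanned - sum_dups
-- ===== SOURCE B (Python) =====
-- def repeated_unique(arr):
--     counts = {}
--     for n in arr:
--         counts[n] = counts.get(n, 0) + 1
--     return sum(v * (2 - c) for v, c in counts.items())
-- ===== Notes on version B (the rewrite author's own statement) =====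
-- stated objective: faster
-- what changed: A scans a growing 'scanned' list for every element (quadratic membership test); B builds a frequency dict in one pass and returns the sum of v*(2-count) over distinct keys, with no per-element first-vs-duplicate branch.
import Mathlib
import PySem

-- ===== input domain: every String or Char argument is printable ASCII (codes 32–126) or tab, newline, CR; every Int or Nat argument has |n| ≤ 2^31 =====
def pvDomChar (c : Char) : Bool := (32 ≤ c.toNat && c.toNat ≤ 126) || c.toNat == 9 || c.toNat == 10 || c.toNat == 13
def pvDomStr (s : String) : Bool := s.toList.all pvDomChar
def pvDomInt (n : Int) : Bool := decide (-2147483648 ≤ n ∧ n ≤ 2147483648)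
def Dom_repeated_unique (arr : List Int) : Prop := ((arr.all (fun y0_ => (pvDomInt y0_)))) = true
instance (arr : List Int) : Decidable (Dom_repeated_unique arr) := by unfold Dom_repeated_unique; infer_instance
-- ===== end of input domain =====

-- B replaces A's quadratic scanned-list scan by a one-pass frequency dict and a sum of v*(2-count) over distinct keys.

-- ===== PORT A =====
def repeated_unique (arr : List Int) : Int :=
  let st := arr.foldl
    (fun (st : List Int × Int × Int) n =>
      if n ∉ st.1 then (st.1 ++ [n], st.2.1 + n, st.2.2)
      else (st.1, st.2.1, st.2.2 + n))
    ([], 0, 0)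
  st.2.1 - st.2.2

-- ===== PORT B =====
def repeated_unique_alt (arr : List Int) : Int :=
  let counts := arr.foldl (fun d n => d.insert n (d.getD n 0 + 1)) PySem.Dict.empty
  (counts.items.map (fun p => p.1 * (2 - p.2))).sum

-- ===== PRECONDITION & SPEC =====
def Spec_repeated_unique (arr : List Int) (out : Int) : Prop := out = repeated_unique_alt arr
instance (arr : List Int) (out : Int) : Decidable (Spec_repeated_unique arr out) := by unfold Spec_repeated_unique; infer_instance

-- ===== CLAIM (what is proved, stated in full; the proofs are below) =====
def Claim_equal_repeated_unique : Prop := ∀ (arr : List Int), Dom_repeated_unique arr → Spec_repeated_unique arr (repeated_unique arr)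

-- ===== LEMMAS AND PROOFS =====

-- A's loop with any starting state: the result is determined by the set of already-seen values.
theorem repA_loop (arr : List Int) : ∀ (s : List Int) (s1 s2 : Int),
    (arr.foldl
      (fun (st : List Int × Int × Int) n =>
        if n ∉ st.1 then (st.1 ++ [n], st.2.1 + n, st.2.2)
        else (st.1, st.2.1, st.2.2 + n))
      (s, s1, s2)).2.1 -
    (arr.foldl
      (fun (st : List Int × Int × Int) n =>
        if n ∉ st.1 then (st.1 ++ [n], st.2.1 + n, st.2.2)
        else (st.1, st.2.1, st.2.2 + n))
      (s, s1, s2)).2.2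
    = s1 - s2 + 2 * (PySem.Set.update s arr).sum - 2 * s.sum - arr.sum := by
  induction arr with
  | nil => intro s s1 s2; simp [PySem.Set.update]
  | cons n t ih =>
    intro s s1 s2
    rw [List.foldl_cons, PySem.Set.update_cons]
    by_cases h : n ∈ s
    · rw [PySem.Set.add_of_mem h]
      simp only [h, not_true_eq_false, ite_false]
      rw [ih s s1 (s2 + n)]
      simp [List.sum_cons]; ring
    · rw [PySem.Set.add_of_not_mem h]
      simp only [h, not_false_eq_true, ite_true]
      rw [ih (s ++ [n]) (s1 + n) s2]
      simp [List.sum_append, List.sum_cons]; ring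

-- sum over a Nodup list of (if k = n then k else 0) picks out n
theorem sum_pick (n : Int) : ∀ (d : List Int), d.Nodup → n ∈ d →
    (d.map (fun k => if k = n then k else 0)).sum = n := by
  intro d
  induction d with
  | nil => intro _ h; simp at h
  | cons k t ih =>
    intro hnd hmem
    simp only [List.map_cons, List.sum_cons]
    rcases List.mem_cons.mp hmem with rfl | hnt
    · have hzero : (t.map (fun x => if x = n then x else 0)).sum = 0 := by
        apply List.sum_eq_zero
        intro y hy
        rcases List.mem_map.mp hy with ⟨x, hx, rfl⟩
        have : x ≠ n := fun e => (List.nodup_cons.mp hnd).1 (e ▸ hx)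
        simp [this]
      simp [hzero]
    · have hkn : k ≠ n := fun e => (List.nodup_cons.mp hnd).1 (e ▸ hnt)
      rw [ih (List.nodup_cons.mp hnd).2 hnt]
      simp [hkn]

-- summing k * count over a Nodup superset of arr's values gives arr.sum
theorem sum_key_count : ∀ (arr : List Int) (d : List Int), d.Nodup → (∀ x ∈ arr, x ∈ d) →
    (d.map (fun k => k * (arr.count k : Int))).sum = arr.sum := by
  intro arr
  induction arr with
  | nil => intro d _ _; simp
  | cons n t ih =>
    intro d hnd hsub
    have hmap : d.map (fun k => k * (((n :: t).count k : Nat) : Int))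
        = d.map (fun k => k * ((t.count k : Nat) : Int) + (if k = n then k else 0)) := by
      apply List.map_congr_left
      intro k _
      by_cases hk : k = n
      · subst hk; simp [mul_add]
      · simp only [List.count_cons]
        have hnk : ¬ n = k := fun e => hk e.symm
        simp [hk, hnk]
    rw [hmap]
    have hsplit : (d.map (fun k => k * ((t.count k : Nat) : Int) + (if k = n then k else 0))).sum
        = (d.map (fun k => k * ((t.count k : Nat) : Int))).sum
          + (d.map (fun k => if k = n then k else 0)).sum := by
      induction d with
      | nil => simp
      | cons a b ihd => simp [List.map_cons, List.sum_cons] at ihd ⊢; omega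
    rw [hsplit, ih d hnd (fun x hx => hsub x (List.mem_cons_of_mem n hx)),
        sum_pick n d hnd (hsub n (List.mem_cons_self ..))]
    simp [List.sum_cons]; ring

-- splitting k*(2 - c k) over any list
theorem sum_two_sub (c : Int → Int) : ∀ (d : List Int),
    (d.map (fun k => k * (2 - c k))).sum = 2 * d.sum - (d.map (fun k => k * c k)).sum := by
  intro d
  induction d with
  | nil => simp
  | cons a b ih => simp [List.map_cons, List.sum_cons, ih]; ring

-- ===== VERDICT (by name: the statement is the Claim_ definition above) =====
theorem repeated_unique_spec : Claim_equal_repeated_unique := by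
  intro arr _
  unfold Spec_repeated_unique repeated_unique repeated_unique_alt
  simp only []
  rw [repA_loop arr [] 0 0]
  rw [PySem.Dict.foldl_insert_getD_add_one_eq_counter, PySem.Dict.items_counter,
      List.map_map]
  have hB : ((PySem.Set.ofList arr).map (fun k => k * (2 - (arr.count k : Int)))).sum
      = 2 * (PySem.Set.ofList arr).sum - arr.sum := by
    rw [sum_two_sub (fun k => (arr.count k : Int)) (PySem.Set.ofList arr),
        sum_key_count arr (PySem.Set.ofList arr) (PySem.Set.nodup_ofList arr)
          (fun x hx => (PySem.Set.mem_ofList arr x).mpr hx)]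
  simp only [Function.comp_def]
  rw [hB, PySem.Set.update_nil_left]
  simp only [List.sum_nil]
  ring
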